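-- pv_equiv track=rewrite | github.com/oldfashionedjelly/advent-of-code-2023 | Day 11/Part 2.py | get_extra_for_crossing_empties
-- ===== SOURCE A (Python) =====
-- def get_extra_for_crossing_empties(
--     point1: tuple[int, int],
--     point2: tuple[int, int],
--     empty_rows: list[int],
--     empty_cols: list[int],
-- ) -> int:
--     extra = 0
--     min_x, max_x = (point1[0], point2[0]) if point1[0] < point2[0] else (point2[0], point1[0])
--     for row in empty_rows:
--         if min_x < row < max_x:
--             extra += 1_000_000 - 1
--
--     min_y, max_y = (point1[1], point2[1]) if point1[1] < point2[1] else (point2[1], point1[1])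
--     for col in empty_cols:
--         if min_y < col < max_y:
--             extra += 1_000_000 - 1
--
--     return extra
-- ===== SOURCE B (Python) =====
-- def _bisect_left(s, x):
--     # first index i with s[i] >= x, s ascending
--     lo, hi = 0, len(s)
--     while lo < hi:
--         mid = (lo + hi) // 2
--         if s[mid] < x:
--             lo = mid + 1
--         else:
--             hi = mid
--     return lo
--
--
-- def _bisect_right(s, x):
--     # first index i with s[i] > x, s ascending
--     lo, hi = 0, len(s)
--     while lo < hi:
--         mid = (lo + hi) // 2
--         if x < s[mid]:
--             hi = mid
--         else:
--             lo = mid + 1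
--     return lo
--
--
-- def _count_strict_between(vals, a, b):
--     lo_v, hi_v = (a, b) if a < b else (b, a)
--     s = sorted(vals)
--     cnt = _bisect_left(s, hi_v) - _bisect_right(s, lo_v)
--     return cnt if cnt > 0 else 0
--
--
-- def get_extra_for_crossing_empties(
--     point1,
--     point2,
--     empty_rows,
--     empty_cols,
-- ):
--     return 999_999 * (
--         _count_strict_between(empty_rows, point1[0], point2[0])
--         + _count_strict_between(empty_cols, point1[1], point2[1])
--     )
-- ===== Notes on version B (the rewrite author's own statement) =====
-- stated objective: alternative
-- what changed: A scans empty_rows and empty_cols linearly counting entries strictly between the coordinates; B sorts each list once and obtains the interval count as a difference of two hand-written binary searches (bisect_left/bisect_right), taking the count times 999999 in one closed-form expression.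
import Mathlib
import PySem

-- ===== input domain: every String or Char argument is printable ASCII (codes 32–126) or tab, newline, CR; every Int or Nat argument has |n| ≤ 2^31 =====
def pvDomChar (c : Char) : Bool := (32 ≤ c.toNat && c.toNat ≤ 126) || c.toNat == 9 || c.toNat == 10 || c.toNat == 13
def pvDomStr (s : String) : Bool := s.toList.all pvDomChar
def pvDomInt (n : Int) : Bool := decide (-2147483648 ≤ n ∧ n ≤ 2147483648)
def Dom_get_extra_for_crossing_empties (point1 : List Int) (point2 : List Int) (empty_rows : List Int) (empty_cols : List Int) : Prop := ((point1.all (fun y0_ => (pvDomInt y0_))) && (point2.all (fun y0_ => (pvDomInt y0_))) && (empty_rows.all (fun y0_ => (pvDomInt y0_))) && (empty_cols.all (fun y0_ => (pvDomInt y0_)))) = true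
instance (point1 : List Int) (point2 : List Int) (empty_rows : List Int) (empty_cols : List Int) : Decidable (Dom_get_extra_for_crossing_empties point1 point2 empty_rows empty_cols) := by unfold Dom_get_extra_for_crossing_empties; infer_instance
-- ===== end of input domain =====

-- B replaces A's two linear scans by sorting each list once and counting the open interval
-- with two hand-written binary searches (alternative decomposition; not claimed faster).


-- ===== PORT A =====
-- point1[0] … point2[1] are ported as getD; exact under Pre_ (both points have length ≥ 2).
def get_extra_for_crossing_empties (point1 : List Int) (point2 : List Int) (empty_rows : List Int) (empty_cols : List Int) : Int :=
  let extra : Int := 0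
  let mm1 := if point1.getD 0 0 < point2.getD 0 0 then (point1.getD 0 0, point2.getD 0 0) else (point2.getD 0 0, point1.getD 0 0)
  let extra := empty_rows.foldl (fun acc row => if mm1.1 < row ∧ row < mm1.2 then acc + (1000000 - 1) else acc) extra
  let mm2 := if point1.getD 1 0 < point2.getD 1 0 then (point1.getD 1 0, point2.getD 1 0) else (point2.getD 1 0, point1.getD 1 0)
  let extra := empty_cols.foldl (fun acc col => if mm2.1 < col ∧ col < mm2.2 then acc + (1000000 - 1) else acc) extra
  extra

-- ===== PORT B =====
-- Source B's hand-written _bisect_left/_bisect_right are EXACTLY the loop of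
-- PySem.List.bisectLeft / bisectRight (lo/hi halving, mid = (lo+hi)//2), so they are
-- ported as those primitives; sorted(vals) is PySem.List.sorted.
def pvCountStrictBetween (vals : List Int) (a b : Int) : Int :=
  let mm := if a < b then (a, b) else (b, a)
  let s := PySem.List.sorted vals (fun v => v)
  let cnt : Int := (PySem.List.bisectLeft s mm.2 : Int) - (PySem.List.bisectRight s mm.1 : Int)
  if cnt > 0 then cnt else 0

def get_extra_for_crossing_empties_alt (point1 : List Int) (point2 : List Int) (empty_rows : List Int) (empty_cols : List Int) : Int :=
  999999 * (pvCountStrictBetween empty_rows (point1.getD 0 0) (point2.getD 0 0)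
    + pvCountStrictBetween empty_cols (point1.getD 1 0) (point2.getD 1 0))

-- ===== PRECONDITION & SPEC =====
-- Pre_ excludes exactly the inputs where Python A raises IndexError: a point with fewer than 2 coordinates.
def Pre_get_extra_for_crossing_empties (point1 : List Int) (point2 : List Int) (empty_rows : List Int) (empty_cols : List Int) : Prop :=
  2 ≤ point1.length ∧ 2 ≤ point2.length
instance (point1 : List Int) (point2 : List Int) (empty_rows : List Int) (empty_cols : List Int) : Decidable (Pre_get_extra_for_crossing_empties point1 point2 empty_rows empty_cols) := by unfold Pre_get_extra_for_crossing_empties; infer_instance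

def pvWitness_get_extra_for_crossing_empties : List Int × List Int × List Int × List Int := ([0, 0], [5, 5], [1, 2, 7], [3])

def Spec_get_extra_for_crossing_empties (point1 : List Int) (point2 : List Int) (empty_rows : List Int) (empty_cols : List Int) (out : Int) : Prop := out = get_extra_for_crossing_empties_alt point1 point2 empty_rows empty_cols
instance (point1 : List Int) (point2 : List Int) (empty_rows : List Int) (empty_cols : List Int) (out : Int) : Decidable (Spec_get_extra_for_crossing_empties point1 point2 empty_rows empty_cols out) := by unfold Spec_get_extra_for_crossing_empties; infer_instance

-- ===== CLAIM (what is proved, stated in full; the proofs are below) =====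
def Claim_equal_get_extra_for_crossing_empties : Prop := ∀ (point1 : List Int) (point2 : List Int) (empty_rows : List Int) (empty_cols : List Int), Dom_get_extra_for_crossing_empties point1 point2 empty_rows empty_cols → Pre_get_extra_for_crossing_empties point1 point2 empty_rows empty_cols → Spec_get_extra_for_crossing_empties point1 point2 empty_rows empty_cols (get_extra_for_crossing_empties point1 point2 empty_rows empty_cols)

-- ===== LEMMAS AND PROOFS =====

-- a list whose first n positions satisfy p and whose later positions do not has countP p = n
theorem pvCountP_eq_of_index (s : List Int) (p : Int → Bool) (n : Nat) (hn : n ≤ s.length)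
    (h1 : ∀ j (hj : j < s.length), j < n → p s[j] = true)
    (h2 : ∀ j (hj : j < s.length), n ≤ j → ¬ p s[j] = true) :
    s.countP p = n := by
  have hsplit : s.countP p = (s.take n).countP p + (s.drop n).countP p := by
    rw [← List.countP_append, List.take_append_drop]
  have ht : (s.take n).countP p = (s.take n).length := by
    rw [List.countP_eq_length]
    intro x hx
    obtain ⟨i, hi, hx⟩ := List.mem_iff_getElem.mp hx
    have hi' : i < s.length := lt_of_lt_of_le (lt_of_lt_of_le hi (by simp)) le_rfl
    have : (s.take n)[i] = s[i] := List.getElem_take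
    exact hx ▸ this ▸ h1 i hi' (lt_of_lt_of_le hi (by simp))
  have hd : (s.drop n).countP p = 0 := by
    rw [List.countP_eq_zero]
    intro x hx
    obtain ⟨i, hi, hx⟩ := List.mem_iff_getElem.mp hx
    have hlen : n + i < s.length := by simp at hi; omega
    have : (s.drop n)[i] = s[n + i] := List.getElem_drop
    exact hx ▸ this ▸ h2 (n + i) hlen (Nat.le_add_right n i)
  rw [hsplit, ht, hd, List.length_take]
  omega

theorem pvBisectLeft_count (s : List Int) (x : Int) (hs : s.Pairwise (· ≤ ·)) :
    PySem.List.bisectLeft s x = s.countP (fun v => decide (v < x)) := by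
  obtain ⟨hle, h1, h2⟩ := PySem.List.bisectLeft_spec s x hs
  exact (pvCountP_eq_of_index s _ _ hle
    (fun j hj hlt => by simpa using h1 j hj hlt)
    (fun j hj hge => by simpa using not_lt.mpr (h2 j hj hge))).symm

theorem pvBisectRight_count (s : List Int) (x : Int) (hs : s.Pairwise (· ≤ ·)) :
    PySem.List.bisectRight s x = s.countP (fun v => decide (v ≤ x)) := by
  obtain ⟨hle, h1, h2⟩ := PySem.List.bisectRight_spec s x hs
  exact (pvCountP_eq_of_index s _ _ hle
    (fun j hj hlt => by simpa using h1 j hj hlt)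
    (fun j hj hge => by simpa using not_le.mpr (h2 j hj hge))).symm

theorem pvCount_split (l : List Int) (a b : Int) (hab : a < b) :
    l.countP (fun v => decide (v < b))
      = l.countP (fun v => decide (v ≤ a)) + l.countP (fun v => decide (a < v ∧ v < b)) := by
  induction l with
  | nil => simp
  | cons x t ih =>
    simp only [List.countP_cons, ih, decide_eq_true_eq]
    split_ifs <;> omega

-- A's loop as 999999 · countP
theorem pvFoldl_count (l : List Int) (lo hi : Int) (acc : Int) :
    l.foldl (fun acc v => if lo < v ∧ v < hi then acc + (1000000 - 1) else acc) acc
      = acc + 999999 * (l.countP (fun v => decide (lo < v ∧ v < hi)) : Int) := by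
  induction l generalizing acc with
  | nil => simp
  | cons x t ih =>
    simp only [List.foldl_cons, List.countP_cons, ih]
    by_cases h : lo < x ∧ x < hi <;> simp [h] <;> push_cast <;> ring

theorem pvCore (vals : List Int) (lo hi : Int) (hle : lo ≤ hi) :
    (if (((PySem.List.bisectLeft (PySem.List.sorted vals (fun v => v)) hi : Int)
          - (PySem.List.bisectRight (PySem.List.sorted vals (fun v => v)) lo : Int)) > 0)
      then ((PySem.List.bisectLeft (PySem.List.sorted vals (fun v => v)) hi : Int)
          - (PySem.List.bisectRight (PySem.List.sorted vals (fun v => v)) lo : Int))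
      else 0)
    = (vals.countP (fun v => decide (lo < v ∧ v < hi)) : Int) := by
  have hp : (PySem.List.sorted vals (fun v => v)).Pairwise (· ≤ ·) :=
    PySem.List.sorted_pairwise vals (fun v => v)
  have hperm : (PySem.List.sorted vals (fun v => v)).Perm vals :=
    PySem.List.sorted_perm vals (fun v => v) false
  rw [pvBisectLeft_count _ _ hp, pvBisectRight_count _ _ hp,
      hperm.countP_eq, hperm.countP_eq]
  rcases lt_or_eq_of_le hle with hlt | heq
  · have := pvCount_split vals lo hi hlt
    split_ifs <;> omega
  · subst heq
    have h0 : vals.countP (fun v => decide (lo < v ∧ v < lo)) = 0 := by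
      rw [List.countP_eq_zero]; intro x _; simp; omega
    have hmono : vals.countP (fun v => decide (v < lo)) ≤ vals.countP (fun v => decide (v ≤ lo)) :=
      List.countP_mono_left (fun x _ h => by simp at h ⊢; omega)
    split_ifs <;> omega

theorem pvCountBetween_eq (vals : List Int) (a b : Int) :
    pvCountStrictBetween vals a b
      = (vals.countP (fun v =>
          decide ((if a < b then (a, b) else (b, a)).1 < v ∧ v < (if a < b then (a, b) else (b, a)).2)) : Int) := by
  by_cases h : a < b <;>
    simp only [pvCountStrictBetween, h, if_true, if_false] <;>
    exact pvCore vals _ _ (by omega)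

-- ===== VERDICT (by name: the statement is the Claim_ definition above) =====
theorem get_extra_for_crossing_empties_spec : Claim_equal_get_extra_for_crossing_empties := by
  intro point1 point2 empty_rows empty_cols _ _
  unfold Spec_get_extra_for_crossing_empties
  unfold get_extra_for_crossing_empties get_extra_for_crossing_empties_alt
  simp only []
  rw [pvFoldl_count, pvFoldl_count, pvCountBetween_eq, pvCountBetween_eq]
  ring
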